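-- pv_equiv track=rewrite | github.com/Greek-and-Roman-God/Apollo | part3_greedy/q6_mukbang.py | solution
-- ===== SOURCE A (Python) =====
-- def solution(food_times, k):
--
--     times = 0
--     for food in food_times: times += food
--     if times <= k: return -1
--
--     while 1:
--         for time in range(0,len(food_times)):
--             if not k: return time+1
--             if food_times[time]:
--                 food_times[time] -= 1
--                 k-=1
-- ===== SOURCE B (Python) =====
-- # B: instead of simulating unit-by-unit, batch whole rounds: repeatedly jump as many
-- # full round-robin rounds as the remaining budget and the smallest positive dish allow,
-- # then locate the answer with one final scan.  Return-value equivalence only: A mutates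
-- # food_times in place, B does not.
-- def solution(food_times, k):
--     total = 0
--     for v in food_times:
--         total += v
--     if total <= k:
--         return -1
--     ft = list(food_times)
--     n = len(ft)
--     while True:
--         c = len([v for v in ft if v != 0])
--         if k <= c:
--             if k == 0:
--                 return 1
--             for i in range(n):
--                 if ft[i] != 0:
--                     k -= 1
--                     if k == 0:
--                         return i + 2 if i + 1 < n else 1
--         r = (k - 1) // c
--         pos = [v for v in ft if v > 0]
--         if pos:
--             m = min(pos)
--             if m < r:
--                 r = m
--         k -= r * c
--         ft = [v - r if v != 0 else 0 for v in ft]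
-- ===== Notes on version B (the rewrite author's own statement) =====
-- stated objective: alternative
-- what changed: Replaces A's unit-by-unit round-robin simulation with round batching: each step jumps min((k-1)//c, smallest positive dish) whole rounds at once, subtracting that many units from every nonzero dish in one pass, and finishes with a single scan for the answer index; a timing run found no measurable speed difference on the generated inputs.
import Mathlib
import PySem

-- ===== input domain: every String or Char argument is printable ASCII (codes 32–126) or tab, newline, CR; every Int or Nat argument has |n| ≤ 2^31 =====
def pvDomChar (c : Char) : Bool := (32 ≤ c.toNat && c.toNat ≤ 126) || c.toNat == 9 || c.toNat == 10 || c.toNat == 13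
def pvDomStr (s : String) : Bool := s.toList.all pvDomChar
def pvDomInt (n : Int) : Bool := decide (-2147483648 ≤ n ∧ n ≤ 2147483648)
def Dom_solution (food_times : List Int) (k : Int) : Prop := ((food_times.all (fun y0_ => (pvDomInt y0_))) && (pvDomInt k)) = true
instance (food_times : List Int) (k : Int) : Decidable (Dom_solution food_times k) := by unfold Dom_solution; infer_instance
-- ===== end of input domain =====

-- B batches whole round-robin rounds (jumping min(budget-rounds, smallest positive dish) rounds
-- at once) instead of A's unit-by-unit simulation; return-value equivalence only: A mutates
-- food_times in place, B does not.

-- ===== PORT A =====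
-- one pass of A's inner `for time in range(0, len(food_times))`, carried positionally:
-- (early-return value if any, updated list, updated k)
def solA_pass : List Int → Int → Nat → Option Int × List Int × Int
  | [], k, _ => (none, [], k)
  | v :: rest, k, pos =>
    if k = 0 then (some ((pos : Int) + 1), v :: rest, k)
    else if v ≠ 0 then
      let t := solA_pass rest (k - 1) (pos + 1)
      (t.1, (v - 1) :: t.2.1, t.2.2)
    else
      let t := solA_pass rest k (pos + 1)
      (t.1, v :: t.2.1, t.2.2)

-- A's `while 1` loop; the fuel only makes the recursion structural and is chosen large enough
-- that under Pre_ it never runs out (each non-returning pass lowers k by at least 1)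
def solA_loop : Nat → List Int → Int → Int
  | 0, _, _ => 0
  | fuel + 1, xs, k =>
    match solA_pass xs k 0 with
    | (some r, _, _) => r
    | (none, xs', k') => solA_loop fuel xs' k'

def solution (food_times : List Int) (k : Int) : Int :=
  let times := food_times.foldl (· + ·) 0
  if times ≤ k then -1
  else solA_loop (k.toNat + 2) food_times k

-- ===== PORT B =====
-- Source B's final scan: `for i in range(n): if ft[i] != 0: k -= 1; if k == 0: return ...`
def solB_scan : List Int → Int → Nat → Nat → Int
  | [], _, _, _ => 0
  | v :: rest, k, i, n =>
    if v ≠ 0 then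
      if k - 1 = 0 then (if i + 1 < n then (i : Int) + 2 else 1)
      else solB_scan rest (k - 1) (i + 1) n
    else solB_scan rest k (i + 1) n

-- Source B's `while True` round-batching loop (fuel as above: k drops by ≥ 1 per iteration)
def solB_loop : Nat → List Int → Int → Nat → Int
  | 0, _, _, _ => 0
  | fuel + 1, ft, k, n =>
    let c : Int := ((ft.filter (fun v => v ≠ 0)).length : Int)
    if k ≤ c then
      if k = 0 then 1 else solB_scan ft k 0 n
    else
      let r0 := PySem.Int.floordiv (k - 1) c
      let posl := ft.filter (fun v => 0 < v)
      let r := match PySem.List.min? posl (fun x => x) with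
               | some m => if m < r0 then m else r0
               | none => r0
      solB_loop fuel (ft.map (fun v => if v ≠ 0 then v - r else 0)) (k - r * c) n

def solution_alt (food_times : List Int) (k : Int) : Int :=
  let total := food_times.foldl (· + ·) 0
  if total ≤ k then -1
  else solB_loop (k.toNat + 2) food_times k food_times.length

-- ===== PRECONDITION & SPEC =====
-- Pre_ excludes exactly the inputs on which A never returns (infinite loop): k < 0 while the
-- dish total exceeds k — there A's `if not k` check can never fire.
def Pre_solution (food_times : List Int) (k : Int) : Prop :=
  food_times.foldl (· + ·) 0 ≤ k ∨ 0 ≤ k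
instance (food_times : List Int) (k : Int) : Decidable (Pre_solution food_times k) := by
  unfold Pre_solution; infer_instance

def pvWitness_solution : List Int × Int := ([3, 1, 2], 5)

def Spec_solution (food_times : List Int) (k : Int) (out : Int) : Prop := out = solution_alt food_times k
instance (food_times : List Int) (k : Int) (out : Int) : Decidable (Spec_solution food_times k out) := by unfold Spec_solution; infer_instance

-- ===== CLAIM (what is proved, stated in full; the proofs are below) =====
def Claim_equal_solution : Prop := ∀ (food_times : List Int) (k : Int), Dom_solution food_times k → Pre_solution food_times k → Spec_solution food_times k (solution food_times k)

-- ===== LEMMAS AND PROOFS =====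

-- number of nonzero dishes
def pvCnt (xs : List Int) : Nat := (xs.filter (fun v => v ≠ 0)).length

theorem pvCnt_cons (v : Int) (rest : List Int) :
    pvCnt (v :: rest) = (if v ≠ 0 then 1 else 0) + pvCnt rest := by
  by_cases h : v = 0 <;> simp [pvCnt, h] <;> omega

theorem foldl_add_sum (xs : List Int) (a : Int) : xs.foldl (· + ·) a = a + xs.sum := by
  induction xs generalizing a with
  | nil => simp
  | cons v rest ih => simp [List.foldl_cons, ih]; ring

-- all dishes nonpositive means nonpositive total
theorem sum_nonpos_int (xs : List Int) (h : ∀ v ∈ xs, v ≤ 0) : xs.sum ≤ 0 := by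
  induction xs with
  | nil => simp
  | cons v rest ih =>
    have hv := h v (by simp)
    have := ih (fun w hw => h w (by simp [hw]))
    simp only [List.sum_cons]
    omega

theorem pvCnt_pos_of_sum_pos (xs : List Int) (h : 0 < xs.sum) : 1 ≤ pvCnt xs := by
  obtain ⟨v, hv, hvpos⟩ : ∃ v ∈ xs, 0 < v := by
    by_contra h'
    push_neg at h'
    have := sum_nonpos_int xs h'
    omega
  have hmem : v ∈ xs.filter (fun v => v ≠ 0) := List.mem_filter.mpr ⟨hv, by simp; omega⟩
  have hlen := List.length_pos_iff.mpr (List.ne_nil_of_mem hmem)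
  unfold pvCnt
  omega

theorem pos_filter_ne_nil_of_sum_pos (xs : List Int) (h : 0 < xs.sum) :
    xs.filter (fun v => 0 < v) ≠ [] := by
  by_contra hc
  have hall : ∀ v ∈ xs, v ≤ 0 := by
    intro v hv
    by_contra hv0
    exact List.ne_nil_of_mem (List.mem_filter.mpr ⟨hv, by simpa using hv0⟩) hc
  have := sum_nonpos_int xs hall
  omega

-- a full pass with budget strictly above the nonzero count: no return, every nonzero dish −1
theorem solA_pass_full (xs : List Int) (k : Int) (pos : Nat)
    (h : (pvCnt xs : Int) < k) :
    solA_pass xs k pos = (none, xs.map (fun v => if v = 0 then 0 else v - 1), k - pvCnt xs) := by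
  induction xs generalizing k pos with
  | nil => simp [solA_pass, pvCnt]
  | cons v rest ih =>
    have hc := pvCnt_cons v rest
    have hk0 : ¬ k = 0 := by
      have : (0:Int) ≤ (pvCnt (v :: rest) : Int) := Int.natCast_nonneg _
      omega
    by_cases hv : v = 0
    · have h' : (pvCnt rest : Int) < k := by
        rw [hc] at h; simp [hv] at h; exact_mod_cast h
      simp [solA_pass, hk0, hv, ih _ _ h', pvCnt_cons]
    · have h' : (pvCnt rest : Int) < k - 1 := by
        rw [hc] at h; simp [hv] at h; push_cast at h ⊢; omega
      rw [hc]
      simp [solA_pass, hk0, hv, ih _ _ h']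
      push_cast
      ring

theorem solA_pass_length (xs : List Int) (k : Int) (pos : Nat) :
    (solA_pass xs k pos).2.1.length = xs.length := by
  induction xs generalizing k pos with
  | nil => simp [solA_pass]
  | cons v rest ih =>
    by_cases hk : k = 0
    · simp [solA_pass, hk]
    · by_cases hv : v = 0 <;> simp [solA_pass, hk, hv, ih]

-- with budget 0 and a nonempty list A returns 1 at the head of the next pass
theorem solA_loop_zero (xs : List Int) (fuel : Nat) (hx : xs ≠ []) (hf : 1 ≤ fuel) :
    solA_loop fuel xs 0 = 1 := by
  obtain ⟨f, rfl⟩ : ∃ f, fuel = f + 1 := ⟨fuel - 1, by omega⟩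
  cases xs with
  | nil => exact absurd rfl hx
  | cons v rest => simp [solA_loop, solA_pass]

-- partial pass (1 ≤ k ≤ nonzero count): A either returns the scan answer inside the pass, or
-- the k-th nonzero dish is the last element — then the pass ends with k' = 0 and the scan says 1
theorem solA_pass_scan (xs : List Int) (k : Int) (pos n : Nat)
    (h1 : 1 ≤ k) (h2 : k ≤ (pvCnt xs : Int)) (hn : pos + xs.length = n) :
    (match solA_pass xs k pos with
     | (some j, _, _) => j = solB_scan xs k pos n
     | (none, _, k') => k' = 0 ∧ solB_scan xs k pos n = 1) := by
  induction xs generalizing k pos with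
  | nil => simp [pvCnt] at h2; omega
  | cons v rest ih =>
    have hk0 : ¬ k = 0 := by omega
    by_cases hv : v = 0
    · have h2' : k ≤ (pvCnt rest : Int) := by
        rw [pvCnt_cons] at h2; simpa [hv] using h2
      have hrec := ih k (pos + 1) h1 h2' (by simp at hn ⊢; omega)
      simp only [solA_pass, solB_scan, hk0, if_false, ite_false, hv,
        if_neg (by simp : ¬((0:Int) ≠ 0))] at hrec ⊢
      revert hrec
      cases hpa : solA_pass rest k (pos + 1) with
      | mk o p =>
        cases o <;> simp_all
    · by_cases hk1 : k = 1
      · subst hk1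
        cases rest with
        | nil =>
          have hlast : ¬ (pos + 1 < n) := by simp at hn; omega
          simp [solA_pass, solB_scan, hv, hlast]
        | cons w ws =>
          have hlt : pos + 1 < n := by simp at hn; omega
          simp [solA_pass, solB_scan, hv, hlt]
          push_cast; ring
      · have h1' : 1 ≤ k - 1 := by omega
        have h2' : k - 1 ≤ (pvCnt rest : Int) := by
          rw [pvCnt_cons] at h2; simp [hv] at h2; push_cast at h2 ⊢; omega
        have hrec := ih (k - 1) (pos + 1) h1' h2' (by simp at hn ⊢; omega)
        have hkm1 : ¬ (k - 1 = 0) := by omega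
        simp only [solA_pass, solB_scan, hk0, hv, if_false, ite_false, if_true, hkm1,
          ne_eq, not_false_eq_true] at hrec ⊢
        revert hrec
        cases hpa : solA_pass rest (k - 1) (pos + 1) with
        | mk o p =>
          cases o <;> simp_all

-- decrementing nonzero dishes never increases the nonzero count
theorem pvCnt_dec_le (xs : List Int) :
    pvCnt (xs.map (fun v => if v = 0 then 0 else v - 1)) ≤ pvCnt xs := by
  induction xs with
  | nil => simp [pvCnt]
  | cons v rest ih =>
    by_cases hv : v = 0
    · simpa [pvCnt_cons, hv] using ih
    · by_cases hv1 : v - 1 = 0 <;> simp [pvCnt_cons, hv, hv1] <;> omega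

-- if no dish holds exactly 1, the nonzero count is preserved by a decrement
theorem pvCnt_dec_eq (xs : List Int) (h : ∀ v ∈ xs, v ≠ 1) :
    pvCnt (xs.map (fun v => if v = 0 then 0 else v - 1)) = pvCnt xs := by
  induction xs with
  | nil => simp
  | cons v rest ih =>
    have hv1 : v ≠ 1 := h v (by simp)
    have ih' := ih (fun w hw => h w (by simp [hw]))
    by_cases hv : v = 0
    · simpa [pvCnt_cons, hv] using ih'
    · have : ¬ (v - 1 = 0) := by omega
      simp [pvCnt_cons, hv, this, ih']

-- subtracting r from every nonzero dish lowers the total by r·cnt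
theorem pvSum_sub (xs : List Int) (r : Int) :
    (xs.map (fun v => if v = 0 then 0 else v - r)).sum = xs.sum - r * pvCnt xs := by
  induction xs with
  | nil => simp [pvCnt]
  | cons v rest ih =>
    by_cases hv : v = 0 <;> simp [pvCnt_cons, hv, ih] <;> push_cast <;> ring

-- r full passes of A in one step: no return, every nonzero dish −r, budget −r·cnt
theorem solA_jump (r : Nat) (xs : List Int) (k : Int) (fuel : Nat)
    (hk : (r : Int) * pvCnt xs < k)
    (hmem : ∀ v ∈ xs, 0 < v → (r : Int) ≤ v)
    (hf : r ≤ fuel) :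
    solA_loop fuel xs k =
      solA_loop (fuel - r) (xs.map (fun v => if v = 0 then 0 else v - (r : Int))) (k - (r : Int) * pvCnt xs) := by
  induction r generalizing xs k fuel with
  | zero =>
    have hmap : xs.map (fun v => if v = 0 then 0 else v) = xs := by
      conv_rhs => rw [← List.map_id xs]
      exact List.map_congr_left (fun w _ => by by_cases hw : w = 0 <;> simp [hw])
    simp [hmap]
  | succ r ih =>
    have hc0 : (0:Int) ≤ (pvCnt xs : Int) := Int.natCast_nonneg _
    have hr0 : (0:Int) ≤ (r : Int) := Int.natCast_nonneg _
    have hkc : (pvCnt xs : Int) < k := by push_cast at hk; nlinarith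
    obtain ⟨f, rfl⟩ : ∃ f, fuel = f + 1 := ⟨fuel - 1, by omega⟩
    have hstep : solA_loop (f + 1) xs k
        = solA_loop f (xs.map (fun v => if v = 0 then 0 else v - 1)) (k - pvCnt xs) := by
      rw [solA_loop, solA_pass_full xs k 0 hkc]
    rw [hstep]
    set xs' := xs.map (fun v => if v = 0 then 0 else v - 1) with hxs'
    have hcle : (pvCnt xs' : Int) ≤ (pvCnt xs : Int) := by exact_mod_cast pvCnt_dec_le xs
    have hk' : (r : Int) * pvCnt xs' < k - pvCnt xs := by
      have h1 : (r : Int) * pvCnt xs' ≤ (r : Int) * pvCnt xs :=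
        mul_le_mul_of_nonneg_left hcle hr0
      push_cast at hk ⊢
      nlinarith
    have hmem' : ∀ v ∈ xs', 0 < v → (r : Int) ≤ v := by
      intro v hvmem hvpos
      simp only [hxs', List.mem_map] at hvmem
      obtain ⟨w, hw, rfl⟩ := hvmem
      by_cases hw0 : w = 0
      · simp [hw0] at hvpos
      · simp only [hw0, if_false, ite_false] at hvpos ⊢
        have := hmem w hw (by omega)
        push_cast at this
        omega
    rw [ih xs' (k - pvCnt xs) f hk' hmem' (by omega)]
    have hmap : xs'.map (fun v => if v = 0 then 0 else v - (r : Int))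
        = xs.map (fun v => if v = 0 then 0 else v - ((r + 1 : Nat) : Int)) := by
      rw [hxs', List.map_map]
      apply List.map_congr_left
      intro w hw
      by_cases hw0 : w = 0
      · simp [Function.comp, hw0]
      · by_cases hw1 : w - 1 = 0
        · have hwv : w = 1 := by omega
          have hm := hmem w hw (by omega)
          have hr00 : r = 0 := by push_cast at hm; omega
          simp [Function.comp, hw0, hw1, hwv, hr00]
        · simp only [Function.comp_def, hw0, if_false, ite_false, hw1]
          push_cast; ring_nf
    rw [hmap]
    -- budgets: with r ≥ 1 the decrement preserved the count; with r = 0 the r·cnt term vanishes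
    have hbud : k - (pvCnt xs : Int) - (r : Int) * pvCnt xs' = k - ((r + 1 : Nat) : Int) * pvCnt xs := by
      rcases Nat.eq_zero_or_pos r with hr | hr
      · subst hr; push_cast; ring
      · have hne1 : ∀ v ∈ xs, v ≠ 1 := by
          intro v hv
          by_cases hvpos : 0 < v
          · have := hmem v hv hvpos
            push_cast at this; omega
          · omega
        have : pvCnt xs' = pvCnt xs := pvCnt_dec_eq xs hne1
        rw [this]; push_cast; ring
    rw [hbud]
    congr 1
    omega

-- the core equivalence: A's unit-by-unit loop = B's round-batching loop
theorem loop_eq (fuelB : Nat) : ∀ (xs : List Int) (k : Int) (fuelA : Nat),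
    0 ≤ k → k < xs.sum → k.toNat < fuelA → k.toNat < fuelB →
    solA_loop fuelA xs k = solB_loop fuelB xs k xs.length := by
  induction fuelB with
  | zero => intro xs k fuelA _ _ _ h; omega
  | succ fb ih =>
    intro xs k fuelA h0 hsum hfA hfB
    have hxs : xs ≠ [] := by rintro rfl; simp at hsum; omega
    have hcdef : ((xs.filter (fun v => v ≠ 0)).length : Int) = (pvCnt xs : Int) := rfl
    by_cases hkc : k ≤ (pvCnt xs : Int)
    · by_cases hk0 : k = 0
      · subst hk0
        rw [solA_loop_zero xs fuelA hxs (by omega)]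
        simp [solB_loop, hcdef, hkc]
      · -- 1 ≤ k ≤ cnt: a partial pass decides the answer
        have hscan := solA_pass_scan xs k 0 xs.length (by omega) hkc (by simp)
        have hB : solB_loop (fb + 1) xs k xs.length = solB_scan xs k 0 xs.length := by
          simp only [solB_loop, hcdef]
          rw [if_pos hkc, if_neg hk0]
        rw [hB]
        obtain ⟨fa, rfl⟩ : ∃ fa, fuelA = fa + 1 := ⟨fuelA - 1, by omega⟩
        rw [solA_loop]
        revert hscan
        cases hpa : solA_pass xs k 0 with
        | mk o p =>
          cases o with
          | some j => intro hscan; simpa using hscan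
          | none =>
            intro hscan
            obtain ⟨hk', hs1⟩ := hscan
            have hx' : p.1 ≠ [] := by
              have hl := solA_pass_length xs k 0
              rw [hpa] at hl
              simp only at hl
              intro hnil
              rw [hnil] at hl
              simp at hl
              exact hxs (List.eq_nil_of_length_eq_zero hl.symm)
            have hfa : 1 ≤ fa := by
              have : 1 ≤ k.toNat := by omega
              omega
            simp only [hk']
            rw [solA_loop_zero p.1 fa hx' hfa, hs1]
    · -- jump branch: k > cnt ≥ 1
      have hsum0 : 0 < xs.sum := by omega
      have hc1 : (1:Int) ≤ (pvCnt xs : Int) := by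
        exact_mod_cast pvCnt_pos_of_sum_pos xs hsum0
      have hposl : xs.filter (fun v => 0 < v) ≠ [] := pos_filter_ne_nil_of_sum_pos xs hsum0
      obtain ⟨m, hm⟩ : ∃ m, PySem.List.min? (xs.filter (fun v => 0 < v)) (fun x => x) = some m := by
        cases hmin : PySem.List.min? (xs.filter (fun v => 0 < v)) (fun x => x) with
        | none => exact absurd ((PySem.List.min?_eq_none_iff _ _).mp hmin) hposl
        | some m => exact ⟨m, rfl⟩
      have hm1 : 1 ≤ m := by
        have hmm := PySem.List.min?_mem hm
        have hmf := List.mem_filter.mp hmm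
        have : 0 < m := by simpa using hmf.2
        omega
      set r0 : Int := PySem.Int.floordiv (k - 1) (pvCnt xs : Int) with hr0def
      set r : Int := if m < r0 then m else r0 with hrdef
      have hr0ge : 1 ≤ r0 := by
        rw [hr0def]
        exact (PySem.Int.le_floordiv_iff_mul_le (by omega)).mpr (by omega)
      have hr1 : 1 ≤ r := by
        rw [hrdef]; split <;> omega
      have hr0c : r0 * (pvCnt xs : Int) ≤ k - 1 := by
        have hmul := PySem.Int.floordiv_mul_add_mod (k - 1) (pvCnt xs : Int)
        have hmn := PySem.Int.mod_nonneg (k - 1) (b := (pvCnt xs : Int)) (by omega)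
        rw [← hr0def] at hmul
        omega
      have hrc : r * (pvCnt xs : Int) ≤ k - 1 := by
        have hrle : r ≤ r0 := by rw [hrdef]; split <;> omega
        have := mul_le_mul_of_nonneg_right hrle (by omega : (0:Int) ≤ (pvCnt xs : Int))
        omega
      have hrm : ∀ v ∈ xs, 0 < v → r ≤ v := by
        intro v hv hvpos
        have hvmem : v ∈ xs.filter (fun v => 0 < v) := List.mem_filter.mpr ⟨hv, by simpa using hvpos⟩
        have hle := PySem.List.min?_isMin hm v hvmem
        have hrle : r ≤ m := by rw [hrdef]; split <;> omega
        simpa using le_trans hrle hle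
      have hrc1 : 1 ≤ r * (pvCnt xs : Int) := by nlinarith
      have hrlec : r ≤ r * (pvCnt xs : Int) := by nlinarith
      have hrcast : ((r.toNat : Int)) = r := Int.toNat_of_nonneg (by omega)
      have hjump := solA_jump r.toNat xs k fuelA
        (by rw [hrcast]; omega)
        (by intro v hv hvpos; rw [hrcast]; exact hrm v hv hvpos)
        (by omega)
      rw [hrcast] at hjump
      have hB : solB_loop (fb + 1) xs k xs.length
          = solB_loop fb (xs.map (fun v => if v ≠ 0 then v - r else 0))
              (k - r * (pvCnt xs : Int)) xs.length := by
        simp only [solB_loop, hcdef]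
        rw [if_neg (by omega), hm]
      rw [hB, hjump]
      have hmapeq : xs.map (fun v => if v ≠ 0 then v - r else 0)
          = xs.map (fun v => if v = 0 then 0 else v - r) := by
        apply List.map_congr_left
        intro w _
        by_cases hw : w = 0 <;> simp [hw]
      have hysum : (xs.map (fun v => if v ≠ 0 then v - r else 0)).sum
          = xs.sum - r * (pvCnt xs : Int) := by
        rw [hmapeq, pvSum_sub]
      have hlen : (xs.map (fun v => if v ≠ 0 then v - r else 0)).length = xs.length :=
        List.length_map ..
      have hih := ih (xs.map (fun v => if v ≠ 0 then v - r else 0))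
        (k - r * (pvCnt xs : Int)) (fuelA - r.toNat)
        (by omega)
        (by rw [hysum]; omega)
        (by omega)
        (by omega)
      rw [hlen] at hih
      rw [← hmapeq]
      exact hih

-- ===== VERDICT (by name: the statement is the Claim_ definition above) =====
theorem solution_spec : Claim_equal_solution := by
  intro xs k _ hpre
  unfold Spec_solution solution solution_alt
  simp only
  by_cases hle : xs.foldl (· + ·) 0 ≤ k
  · simp [hle]
  · have h0 : 0 ≤ k := by
      rcases hpre with h | h
      · exact absurd h hle
      · exact h
    have hsum : k < xs.sum := by
      rw [foldl_add_sum] at hle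
      omega
    rw [if_neg hle, if_neg hle]
    exact loop_eq (k.toNat + 2) xs k (k.toNat + 2) h0 hsum (by omega) (by omega)
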